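-- pv_equiv track=rewrite | github.com/claudiobierig/adventofcode19 | solutions/solution_04.py | has_a_double_not_in_larger_group
-- ===== SOURCE A (Python) =====
-- def has_a_double_not_in_larger_group(s):
--     """
--     >>> has_a_double_not_in_larger_group('1234')
--     False
--     >>> has_a_double_not_in_larger_group('111123')
--     False
--     >>> has_a_double_not_in_larger_group('135679')
--     False
--     >>> has_a_double_not_in_larger_group('223450')
--     True
--     >>> has_a_double_not_in_larger_group('111111')
--     False
--     >>> has_a_double_not_in_larger_group('123789')
--     False
--     >>> has_a_double_not_in_larger_group('112233')
--     True
--     >>> has_a_double_not_in_larger_group('123444')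
--     False
--     >>> has_a_double_not_in_larger_group('111122')
--     True
--     """
--     l = [int(c) for c in s]
--     while len(l) > 0:
--         current_l = []
--         current_l.append(l.pop(0))
--         while len(l) > 0:
--             if l[0] == current_l[0]:
--                 current_l.append(l.pop(0))
--             else:
--                 break
--         if len(current_l) == 2:
--             return True
--     return False
-- ===== SOURCE B (Python) =====
-- def has_a_double_not_in_larger_group(s):
--     d = [int(c) for c in s]
--     prev = None
--     while len(d) >= 2:
--         if d[0] == d[1] and d[0] != prev and (len(d) < 3 or d[2] != d[0]):
--             return True
--         prev = d[0]
--         d = d[1:]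
--     return False
-- ===== Notes on version B (the rewrite author's own statement) =====
-- stated objective: alternative
-- what changed: A pops whole consecutive-digit groups off the front of the list and tests each group's length for 2; B keeps no group accumulator and instead slides a d[0]/d[1] neighbour window with a lookahead d[2] and the previously dropped digit, returning True at the first exactly-two run.
import Mathlib
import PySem

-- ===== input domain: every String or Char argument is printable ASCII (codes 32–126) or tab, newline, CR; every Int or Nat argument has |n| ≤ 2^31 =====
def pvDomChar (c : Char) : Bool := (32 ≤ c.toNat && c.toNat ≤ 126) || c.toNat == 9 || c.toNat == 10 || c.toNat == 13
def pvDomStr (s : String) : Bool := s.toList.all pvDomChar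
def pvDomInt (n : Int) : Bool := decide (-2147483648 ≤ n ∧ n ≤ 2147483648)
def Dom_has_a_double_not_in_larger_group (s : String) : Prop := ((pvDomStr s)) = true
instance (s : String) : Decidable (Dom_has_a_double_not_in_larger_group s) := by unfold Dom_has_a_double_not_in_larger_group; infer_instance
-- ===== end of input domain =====

-- B replaces A's group-popping accumulator by a sliding neighbour-window scan that carries the
-- previous digit (alternative decomposition; same return value, no speed claim).

-- digits of s, as Python's [int(c) for c in s] on digit-only strings (Pre_ excludes the rest,
-- where int(c) raises ValueError)
def pvDigits (s : String) : List Int := s.toList.map (fun c => (c.toNat : Int) - 48)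

-- ===== PORT A =====
-- inner while loop of A: pop leading elements equal to current_l[0]; returns
-- (number of popped elements, remaining list)
def pvPopRun (x : Int) : List Int → Nat × List Int
  | [] => (0, [])
  | y :: rest =>
      if y = x then
        let p := pvPopRun x rest
        (p.1 + 1, p.2)
      else (0, y :: rest)

theorem pvPopRun_len (x : Int) (l : List Int) : (pvPopRun x l).2.length ≤ l.length := by
  induction l with
  | nil => simp [pvPopRun]
  | cons y rest ih =>
      by_cases h : y = x
      · simp [pvPopRun, h]; omega
      · simp [pvPopRun, h]

-- outer while loop of A: current_l has (pvPopRun x rest).1 + 1 elements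
def pvRunA : List Int → Bool
  | [] => false
  | x :: rest =>
      if (pvPopRun x rest).1 + 1 = 2 then true else pvRunA (pvPopRun x rest).2
termination_by l => l.length
decreasing_by
  have := pvPopRun_len x rest
  simp; omega

def has_a_double_not_in_larger_group (s : String) : Bool := pvRunA (pvDigits s)

-- ===== PORT B =====
-- B's while loop: window d[0]/d[1] with lookahead d[2] and the previous digit, then drop d[0]
def pvScanB : Option Int → List Int → Bool
  | prev, a :: b :: rest =>
      if a = b ∧ some a ≠ prev ∧ rest.head? ≠ some a then true
      else pvScanB (some a) (b :: rest)
  | _, _ => false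

def has_a_double_not_in_larger_group_alt (s : String) : Bool := pvScanB none (pvDigits s)

-- ===== PRECONDITION & SPEC =====
-- Pre_: every character is a decimal digit; on any other character int(c) raises ValueError in
-- both A and B, so those inputs are excluded.
def Pre_has_a_double_not_in_larger_group (s : String) : Prop :=
  (s.toList.all (fun c => '0' ≤ c && c ≤ '9')) = true
instance (s : String) : Decidable (Pre_has_a_double_not_in_larger_group s) := by
  unfold Pre_has_a_double_not_in_larger_group; infer_instance

def pvWitness_has_a_double_not_in_larger_group : String := "22"

def Spec_has_a_double_not_in_larger_group (s : String) (out : Bool) : Prop := out = has_a_double_not_in_larger_group_alt s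
instance (s : String) (out : Bool) : Decidable (Spec_has_a_double_not_in_larger_group s out) := by unfold Spec_has_a_double_not_in_larger_group; infer_instance

-- ===== CLAIM (what is proved, stated in full; the proofs are below) =====
def Claim_equal_has_a_double_not_in_larger_group : Prop := ∀ (s : String), Dom_has_a_double_not_in_larger_group s → Pre_has_a_double_not_in_larger_group s → Spec_has_a_double_not_in_larger_group s (has_a_double_not_in_larger_group s)

-- ===== LEMMAS AND PROOFS =====

-- pvPopRun decomposes the list: popped part is a replicate, and the rest does not start with x
theorem pvPopRun_spec (x : Int) (l : List Int) :
    l = List.replicate (pvPopRun x l).1 x ++ (pvPopRun x l).2 ∧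
    (pvPopRun x l).2.head? ≠ some x := by
  induction l with
  | nil => simp [pvPopRun]
  | cons y rest ih =>
      by_cases h : y = x
      · subst h
        simpa [pvPopRun, List.replicate_succ] using ih
      · simp [pvPopRun, h]

-- pvScanB reads prev only through a comparison with the head of the list
theorem pvScanB_prev_irrel (q : Int) (l : List Int) (h : l.head? ≠ some q) :
    pvScanB (some q) l = pvScanB none l := by
  match l with
  | [] => rfl
  | [a] => rfl
  | a :: b :: rest =>
      have ha : a ≠ q := by simpa using h
      have hiff : (a = b ∧ some a ≠ some q ∧ rest.head? ≠ some a) ↔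
          (a = b ∧ some a ≠ (none : Option Int) ∧ rest.head? ≠ some a) := by
        constructor
        · rintro ⟨p, _, r2⟩; exact ⟨p, by simp, r2⟩
        · rintro ⟨p, _, r2⟩; exact ⟨p, by simpa using ha, r2⟩
      simp only [pvScanB, hiff]

-- pvScanB skips the rest of a run it is already inside
theorem pvScanB_skip (x : Int) : ∀ (m : Nat) (r : List Int), r.head? ≠ some x →
    pvScanB (some x) (List.replicate (m + 1) x ++ r) = pvScanB none r := by
  intro m
  induction m with
  | zero =>
      intro r hr
      have e : List.replicate (0 + 1) x ++ r = x :: r := by simp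
      rw [e]
      match r, hr with
      | [], _ => rfl
      | b :: rs, hr =>
          have hb : b ≠ x := by simpa [eq_comm] using hr
          rw [pvScanB, if_neg (fun hc => hb hc.1.symm)]
          exact pvScanB_prev_irrel x (b :: rs) hr
  | succ m ih =>
      intro r hr
      have e : List.replicate (m + 1 + 1) x ++ r = x :: x :: (List.replicate m x ++ r) := by
        simp [List.replicate_succ]
      rw [e, pvScanB, if_neg (by simp)]
      have e2 : x :: (List.replicate m x ++ r) = List.replicate (m + 1) x ++ r := by
        simp [List.replicate_succ]
      rw [e2]
      exact ih r hr

-- main equivalence on digit lists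
theorem pvRunA_eq_scanB : ∀ (n : Nat) (l : List Int), l.length ≤ n → pvRunA l = pvScanB none l := by
  intro n
  induction n with
  | zero =>
      intro l hl
      have : l = [] := List.eq_nil_of_length_eq_zero (Nat.le_zero.mp hl)
      subst this
      simp [pvRunA, pvScanB]
  | succ n ih =>
      intro l hl
      match l with
      | [] => simp [pvRunA, pvScanB]
      | x :: rest =>
          obtain ⟨⟨k, r⟩, hpr⟩ : ∃ p, pvPopRun x rest = p := ⟨_, rfl⟩
          have hdec : rest = List.replicate k x ++ r := by
            simpa [hpr] using (pvPopRun_spec x rest).1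
          have hhead : r.head? ≠ some x := by
            simpa [hpr] using (pvPopRun_spec x rest).2
          rcases k with _ | k
          · -- run of length exactly 1
            have hdec' : rest = r := by simpa using hdec
            subst hdec'
            have hA : pvRunA (x :: rest) = pvRunA rest := by
              rw [pvRunA, hpr]; simp
            rw [hA]
            match rest, hhead, hl with
            | [], _, _ => simp [pvRunA, pvScanB]
            | b :: rs, hhead, hl =>
                have hb : b ≠ x := by simpa [eq_comm] using hhead
                have hB : pvScanB none (x :: b :: rs) = pvScanB none (b :: rs) := by
                  rw [pvScanB, if_neg (fun hc => hb hc.1.symm)]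
                  exact pvScanB_prev_irrel x (b :: rs) hhead
                rw [hB]
                exact ih (b :: rs) (by simp at hl ⊢; omega)
          rcases k with _ | m
          · -- run of length exactly 2: both sides return true
            have hdec' : rest = x :: r := by simpa using hdec
            subst hdec'
            have hA : pvRunA (x :: x :: r) = true := by
              rw [pvRunA, hpr]; norm_num
            have hB : pvScanB none (x :: x :: r) = true := by
              rw [pvScanB, if_pos ⟨rfl, by simp, hhead⟩]
            rw [hA, hB]
          · -- run of length m + 3 ≥ 3: both sides skip the whole run
            have hdec' : rest = x :: x :: (List.replicate m x ++ r) := by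
              rw [hdec]; simp [List.replicate_succ]
            subst hdec'
            have hA : pvRunA (x :: x :: x :: (List.replicate m x ++ r))
                = pvRunA r := by
              rw [pvRunA, hpr]; rw [if_neg (by simp)]
            have hB : pvScanB none (x :: x :: x :: (List.replicate m x ++ r))
                = pvScanB none r := by
              rw [pvScanB, if_neg (by simp)]
              have e2 : x :: x :: (List.replicate m x ++ r)
                  = List.replicate (m + 1 + 1) x ++ r := by
                simp [List.replicate_succ]
              rw [e2]
              exact pvScanB_skip x (m + 1) r hhead
            rw [hA, hB]
            exact ih r (by simp at hl; omega)

-- ===== VERDICT (by name: the statement is the Claim_ definition above) =====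
theorem has_a_double_not_in_larger_group_spec : Claim_equal_has_a_double_not_in_larger_group := by
  intro s _ _
  unfold Spec_has_a_double_not_in_larger_group has_a_double_not_in_larger_group has_a_double_not_in_larger_group_alt
  exact pvRunA_eq_scanB (pvDigits s).length (pvDigits s) le_rfl
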